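-- pv_equiv track=rewrite | github.com/kuroiSora51/SMCCD-Tranfer-Guide | scrape_webschedule_alt_db.py | parse_course_details
-- ===== SOURCE A (Python) =====
-- SECTION_HEADINGS = [
--     'Course Information',
--     'Course Details',
--     'Meeting Information',
--     'Critical Dates',
--     'Section Fees',
-- ]
--
-- def section_slice(lines, start_heading):
--     try:
--         start = lines.index(start_heading) + 1
--     except ValueError:
--         return []
--     end = len(lines)
--     for heading in SECTION_HEADINGS:
--         if heading == start_heading:
--             continue
--         try:
--             idx = lines.index(heading, start)
--             end = min(end, idx)
--         except ValueError:
--             pass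
--     return lines[start:end]
--
-- def parse_course_details(lines):
--     section = section_slice(lines, 'Course Details')
--     details = {}
--     i = 0
--     while i + 1 < len(section):
--         key = section[i].rstrip(':').strip()
--         value = section[i + 1].strip()
--         details[key] = value
--         i += 2
--     return details
-- ===== SOURCE B (Python) =====
-- SECTION_HEADINGS = [
--     'Course Information',
--     'Course Details',
--     'Meeting Information',
--     'Critical Dates',
--     'Section Fees',
-- ]
--
-- def parse_course_details(lines):
--     # one forward pass: skip to the first 'Course Details', then collect
--     # key/value pairs until any OTHER section heading appears
--     stops = {h for h in SECTION_HEADINGS if h != 'Course Details'}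
--     details = {}
--     seen_start = False
--     key = None
--     for line in lines:
--         if not seen_start:
--             seen_start = line == 'Course Details'
--         elif line in stops:
--             break
--         elif key is None:
--             key = line
--         else:
--             details[key.rstrip(':').strip()] = line.strip()
--             key = None
--     return details
-- ===== Notes on version B (the rewrite author's own statement) =====
-- stated objective: simpler
-- what changed: Replaced section_slice's five separate list.index scans (first find the start heading, then one scan per other heading to compute the section end, then slice and a separate index-stepping pairing loop) by a single forward pass over the lines that keeps a (seen-start, pending-key) state and inserts each completed pair directly, stopping at the first other heading.
import Mathlib
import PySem

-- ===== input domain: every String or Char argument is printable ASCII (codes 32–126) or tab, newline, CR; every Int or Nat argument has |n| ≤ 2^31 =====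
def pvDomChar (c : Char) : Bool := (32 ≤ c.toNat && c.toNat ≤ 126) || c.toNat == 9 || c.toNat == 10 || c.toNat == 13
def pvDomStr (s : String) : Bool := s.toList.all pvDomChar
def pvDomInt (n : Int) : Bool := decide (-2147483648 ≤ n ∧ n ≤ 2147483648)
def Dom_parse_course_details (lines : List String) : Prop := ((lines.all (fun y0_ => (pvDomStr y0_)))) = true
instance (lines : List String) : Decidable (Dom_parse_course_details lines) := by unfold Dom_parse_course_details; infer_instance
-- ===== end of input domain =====

-- B replaces the five list.index scans plus index-stepping pairing loop by one forward pass
-- keeping a (seen-start, pending-key) state; objective: simpler (same observable result).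

-- ===== PORT A =====
-- s.rstrip(':') — drop trailing ':' characters (exact: the chars argument is the single char ':')
def pyRstripColon (s : String) : String :=
  String.ofList ((s.toList.reverse.dropWhile (fun c => c == ':')).reverse)

def pvSectionHeadings : List String :=
  ["Course Information", "Course Details", "Meeting Information", "Critical Dates", "Section Fees"]

def section_slice (lines : List String) (start_heading : String) : List String :=
  match PySem.List.index? lines start_heading with
  | none => []
  | some i =>
    let start := i + 1
    -- lines.index(heading, start) = start + (index of heading in lines[start:])
    let endv := pvSectionHeadings.foldl
      (fun e h =>
        if h == start_heading then e
        else
          match PySem.List.index? (lines.drop start) h with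
          | none => e
          | some j => min e (start + j)) lines.length
    PySem.List.slice lines (some (start : Int)) (some (endv : Int))

-- the while-loop: i advances by 2, consuming section[i], section[i+1]
def pairDetails : List String → PySem.Dict String String → PySem.Dict String String
  | k :: v :: rest, d =>
      pairDetails rest (d.insert (PySem.Str.strip (pyRstripColon k)) (PySem.Str.strip v))
  | _, d => d

def parse_course_details (lines : List String) : List (String × String) :=
  (pairDetails (section_slice lines "Course Details") PySem.Dict.empty).items

-- ===== PORT B =====
-- the for-loop of B with its (seen_start, key) state; returning d is the 'break'
def altGo (stops : List String) :
    List String → Bool → Option String → PySem.Dict String String → PySem.Dict String String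
  | [], _, _, d => d
  | l :: rest, seen, key?, d =>
    if !seen then altGo stops rest (l == "Course Details") key? d
    else if stops.contains l then d
    else
      match key? with
      | none => altGo stops rest seen (some l) d
      | some k =>
          altGo stops rest seen none
            (d.insert (PySem.Str.strip (pyRstripColon k)) (PySem.Str.strip l))

def parse_course_details_alt (lines : List String) : List (String × String) :=
  let stops := PySem.Set.ofList (pvSectionHeadings.filter (fun h => h != "Course Details"))
  (altGo stops lines false none PySem.Dict.empty).items

-- ===== PRECONDITION & SPEC =====
def Spec_parse_course_details (lines : List String) (out : List (String × String)) : Prop := out = parse_course_details_alt lines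
instance (lines : List String) (out : List (String × String)) : Decidable (Spec_parse_course_details lines out) := by unfold Spec_parse_course_details; infer_instance

-- ===== CLAIM (what is proved, stated in full; the proofs are below) =====
def Claim_equal_parse_course_details : Prop := ∀ (lines : List String), Dom_parse_course_details lines → Spec_parse_course_details lines (parse_course_details lines)

-- ===== LEMMAS AND PROOFS =====

-- the four stop headings B's set evaluates to
def pvStops : List String :=
  ["Course Information", "Meeting Information", "Critical Dates", "Section Fees"]

theorem pvStops_eval :
    PySem.Set.ofList (pvSectionHeadings.filter (fun h => h != "Course Details")) = pvStops := by
  decide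

theorem contains_pvStops (x : String) :
    pvStops.contains x = true ↔ (x ∈ pvSectionHeadings ∧ x ≠ "Course Details") := by
  simp only [pvStops, pvSectionHeadings, List.contains_cons, List.contains_nil,
    Bool.or_eq_true, beq_iff_eq, List.mem_cons, List.not_mem_nil, or_false]
  constructor
  · rintro (rfl|rfl|rfl|rfl|h) <;> first | exact absurd h (by simp) | exact ⟨by tauto, by decide⟩
  · rintro ⟨(rfl|rfl|rfl|rfl|rfl|h), hne⟩ <;> tauto


-- the relative step of the end-computation fold, on the tail after the start heading
def relStep (rest : List String) (sh : String) (e : Nat) (h : String) : Nat :=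
  if h == sh then e
  else
    match PySem.List.index? rest h with
    | none => e
    | some j => min e j

-- shifting the fold by the absolute offset s
theorem fold_shift (sh : String) (rest : List String) (s : Nat) :
    ∀ (hs : List String) (e : Nat),
      hs.foldl
        (fun e h =>
          if h == sh then e
          else
            match PySem.List.index? rest h with
            | none => e
            | some j => min e (s + j)) (s + e)
      = s + hs.foldl (relStep rest sh) e := by
  intro hs
  induction hs with
  | nil => intro e; rfl
  | cons h t ih =>
    intro e
    simp only [List.foldl_cons, relStep]
    by_cases hsh : (h == sh) = true
    · simp only [hsh, if_true]; exact ih e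
    · simp only [hsh, Bool.false_eq_true, if_false]
      cases hidx : PySem.List.index? rest h with
      | none => exact ih e
      | some j =>
          show List.foldl _ (min (s + e) (s + j)) t = s + List.foldl (relStep rest sh) (min e j) t
          rw [show min (s + e) (s + j) = s + min e j by omega]
          exact ih _


theorem fold_zero (sh : String) (rest : List String) :
    ∀ hs : List String, hs.foldl (relStep rest sh) 0 = 0 := by
  intro hs
  induction hs with
  | nil => rfl
  | cons h t ih =>
    simp only [List.foldl_cons, relStep]
    by_cases hsh : (h == sh) = true
    · simp only [hsh, if_true]; exact ih
    · simp only [hsh, Bool.false_eq_true, if_false]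
      cases hidx : PySem.List.index? rest h with
      | none => exact ih
      | some j => simpa using ih


theorem fold_hit (sh x : String) (t : List String) (hx : x ≠ sh) :
    ∀ (hs : List String), x ∈ hs → ∀ e, hs.foldl (relStep (x :: t) sh) e = 0 := by
  intro hs
  induction hs with
  | nil => intro h; cases h
  | cons h hs' ih =>
    intro hmem e
    simp only [List.foldl_cons]
    rcases List.mem_cons.mp hmem with rfl | hmem'
    · have : relStep (x :: t) sh e x = 0 := by
        simp only [relStep, beq_eq_false_iff_ne.mpr hx, Bool.false_eq_true, if_false,
          PySem.List.index?_cons_self, Nat.min_zero]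
      rw [this, fold_zero]
    · exact ih hmem' _


theorem fold_miss (sh x : String) (t : List String) :
    ∀ (hs : List String), (∀ h ∈ hs, h ≠ sh → h ≠ x) →
      ∀ e, hs.foldl (relStep (x :: t) sh) (e + 1) = hs.foldl (relStep t sh) e + 1 := by
  intro hs
  induction hs with
  | nil => intro _ e; rfl
  | cons h hs' ih =>
    intro hcond e
    simp only [List.foldl_cons, relStep]
    by_cases hsh : (h == sh) = true
    · simp only [hsh, if_true]
      exact ih (fun a ha => hcond a (List.mem_cons_of_mem _ ha)) e
    · have hne : h ≠ x := hcond h (List.mem_cons_self ..) (by simpa using hsh)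
      simp only [hsh, Bool.false_eq_true, if_false]
      rw [PySem.List.index?_cons_of_ne _ (fun he => hne he.symm)]
      cases hidx : PySem.List.index? t h with
      | none => simp only [Option.map_none]
                exact ih (fun a ha => hcond a (List.mem_cons_of_mem _ ha)) e
      | some j => simp only [Option.map_some]
                  rw [show min (e+1) (j+1) = min e j + 1 by omega]
                  exact ih (fun a ha => hcond a (List.mem_cons_of_mem _ ha)) _


theorem take_fold_eq_takeWhile :
    ∀ rest : List String,
      rest.take (pvSectionHeadings.foldl (relStep rest "Course Details") rest.length)
        = rest.takeWhile (fun l => !(pvStops.contains l)) := by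
  intro rest
  induction rest with
  | nil => simp
  | cons x t ih =>
    by_cases hx : pvStops.contains x = true
    · obtain ⟨hmem, hne⟩ := (contains_pvStops x).mp hx
      rw [fold_hit "Course Details" x t hne pvSectionHeadings hmem]
      have hx' : x ∈ pvStops := by simpa using hx
      simp [hx']
    · have hcond : ∀ h ∈ pvSectionHeadings, h ≠ "Course Details" → h ≠ x := by
        intro h hm hn heq
        exact hx (heq ▸ (contains_pvStops x).mpr ⟨heq ▸ hm, heq ▸ hn⟩)
      rw [show (x :: t).length = t.length + 1 from rfl,
        fold_miss "Course Details" x t pvSectionHeadings hcond t.length]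
      have hx' : x ∉ pvStops := by simpa using hx
      simp [List.take_succ_cons, hx', ih]

theorem altGo_skip (d : PySem.Dict String String) :
    ∀ (pre : List String) (key? : Option String), "Course Details" ∉ pre →
      altGo pvStops pre false key? d = d := by
  intro pre
  induction pre with
  | nil => intro _ _; rfl
  | cons p pre' ih =>
    intro key? hnot
    have hp : (p == "Course Details") = false :=
      beq_eq_false_iff_ne.mpr (fun h => hnot (h ▸ List.mem_cons_self ..))
    simp only [altGo, Bool.not_false, if_true, hp]
    exact ih key? (fun h => hnot (List.mem_cons_of_mem _ h))

theorem altGo_start (rest : List String) :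
    ∀ (pre : List String) (d : PySem.Dict String String),
      "Course Details" ∉ pre →
      altGo pvStops (pre ++ "Course Details" :: rest) false none d
        = altGo pvStops rest true none d := by
  intro pre
  induction pre with
  | nil =>
    intro d _
    simp [altGo]
  | cons p pre' ih =>
    intro d hnot
    have hp : (p == "Course Details") = false :=
      beq_eq_false_iff_ne.mpr (fun h => hnot (h ▸ List.mem_cons_self ..))
    simp only [List.cons_append, altGo, Bool.not_false, if_true, hp]
    exact ih d (fun h => hnot (List.mem_cons_of_mem _ h))

theorem altGo_true :
    ∀ (rest : List String) (key? : Option String) (d : PySem.Dict String String),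
      altGo pvStops rest true key? d
        = pairDetails (key?.toList ++ rest.takeWhile (fun l => !(pvStops.contains l))) d := by
  intro rest
  induction rest with
  | nil => intro key? d; cases key? <;> rfl
  | cons l t ih =>
    intro key? d
    by_cases hl : pvStops.contains l = true
    · have hl' : l ∈ pvStops := by simpa using hl
      have htw : (l :: t).takeWhile (fun l => !(pvStops.contains l)) = [] := by
        simp [hl']
      rw [htw]
      simp only [altGo, Bool.not_true, Bool.false_eq_true, if_false]
      rw [if_pos hl]
      cases key? <;> rfl
    · have htw : (l :: t).takeWhile (fun l => !(pvStops.contains l))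
          = l :: t.takeWhile (fun l => !(pvStops.contains l)) := by
        have hl' : l ∉ pvStops := by simpa using hl
        simp [hl']
      rw [htw]
      simp only [altGo, Bool.not_true, Bool.false_eq_true, if_false]
      rw [if_neg hl]
      cases key? with
      | none => exact ih (some l) d
      | some k => exact ih none _

-- ===== VERDICT (by name: the statement is the Claim_ definition above) =====
theorem parse_course_details_spec : Claim_equal_parse_course_details := by
  intro lines _
  show parse_course_details lines = parse_course_details_alt lines
  simp only [parse_course_details, parse_course_details_alt, pvStops_eval]
  cases h : PySem.List.index? lines "Course Details" with
  | none =>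
    have hnot : "Course Details" ∉ lines := (PySem.List.index?_eq_none_iff _ _).mp h
    rw [altGo_skip _ lines none hnot]
    simp only [section_slice, h]
    rfl
  | some i =>
    obtain ⟨pre, suf, hsplit, hlen, hpre⟩ := (PySem.List.index?_eq_some_iff _ _ _).mp h
    subst hsplit
    subst hlen
    rw [altGo_start suf pre _ hpre, altGo_true suf none _]
    simp only [section_slice, h]
    have hdrop : (pre ++ "Course Details" :: suf).drop (pre.length + 1) = suf := by
      rw [show pre ++ "Course Details" :: suf = (pre ++ ["Course Details"]) ++ suf by simp,
        show pre.length + 1 = (pre ++ ["Course Details"]).length by simp]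
      exact List.drop_left
    have hlenlines : (pre ++ "Course Details" :: suf).length = (pre.length + 1) + suf.length := by
      simp; omega
    rw [hdrop, hlenlines,
      fold_shift "Course Details" suf (pre.length + 1) pvSectionHeadings suf.length]
    rw [show ((((pre.length + 1) + pvSectionHeadings.foldl (relStep suf "Course Details") suf.length : Nat)) : Int)
        = ((pre.length + 1 : Nat) : Int) + ((pvSectionHeadings.foldl (relStep suf "Course Details") suf.length : Nat) : Int) by push_cast; ring]
    rw [PySem.List.slice_natCast_add, hdrop, take_fold_eq_takeWhile suf]
    rfl
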